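-- pv_equiv track=rewrite | github.com/Sunandadadi/game-development | haunted_maze.py | update_zero
-- ===== SOURCE A (Python) =====
-- def update_zero(puzzle, idx, path_coords, path_values):
--     # If monster's seen from border 0, then border cells must be Ghosts and reflections must be Vampires
--     mirror = False
--     for pc,pv in zip(path_coords, path_values):
--         if pv == 'M':
--             mirror = True
--         else:
--             if mirror == False:
--                 puzzle[pc[0]][pc[1]] = 'G'
--             else:
--                 puzzle[pc[0]][pc[1]] = 'V'
--     return puzzle
-- ===== SOURCE B (Python) =====
-- def update_zero(puzzle, idx, path_coords, path_values):
--     # Boundary decomposition: locate the first 'M' in the zipped path, then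
--     # write 'G' in the whole prefix and 'V' in the suffix (skipping 'M' cells).
--     pairs = list(zip(path_coords, path_values))
--     vals = [pv for _, pv in pairs]
--     split = vals.index('M') if 'M' in vals else len(pairs)
--     for (r, c), _pv in pairs[:split]:
--         puzzle[r][c] = 'G'
--     for (r, c), pv in pairs[split:]:
--         if pv != 'M':
--             puzzle[r][c] = 'V'
--     return puzzle
-- ===== Notes on version B (the rewrite author's own statement) =====
-- stated objective: alternative
-- what changed: Replaces the stateful mirror-flag latching scan with a boundary decomposition: find the index of the first 'M' in the zipped path, then one loop writes 'G' over the prefix and a second loop writes 'V' over the suffix (skipping 'M' cells).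
import Mathlib
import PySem

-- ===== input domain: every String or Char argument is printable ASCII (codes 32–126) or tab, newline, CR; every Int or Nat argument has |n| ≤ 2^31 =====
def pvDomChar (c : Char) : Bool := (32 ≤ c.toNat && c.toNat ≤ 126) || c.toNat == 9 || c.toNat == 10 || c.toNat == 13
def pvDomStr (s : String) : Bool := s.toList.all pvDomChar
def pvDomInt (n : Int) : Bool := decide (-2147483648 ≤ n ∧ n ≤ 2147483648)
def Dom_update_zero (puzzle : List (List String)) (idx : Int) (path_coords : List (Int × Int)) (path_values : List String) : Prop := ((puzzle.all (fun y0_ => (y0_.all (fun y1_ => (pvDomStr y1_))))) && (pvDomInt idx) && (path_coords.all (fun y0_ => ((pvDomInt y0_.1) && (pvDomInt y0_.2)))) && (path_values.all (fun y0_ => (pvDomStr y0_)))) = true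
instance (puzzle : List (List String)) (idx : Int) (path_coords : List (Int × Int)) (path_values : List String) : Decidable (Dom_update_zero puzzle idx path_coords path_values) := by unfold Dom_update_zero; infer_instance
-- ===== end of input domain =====

-- B replaces A's stateful mirror-flag scan with a find-first-'M'-then-two-loops decomposition
-- (objective: alternative). Both Pythons mutate `puzzle` in place identically; the theorems are
-- about the returned value.

-- ===== PORT A =====
-- puzzle[r][c] = v  (Python assignment; total form, faithful under Pre_'s InRange conditions)
def pvSetCell (pz : List (List String)) (r c : Int) (v : String) : List (List String) :=
  PySem.List.pySetD pz r (PySem.List.pySetD ((PySem.List.pyGet? pz r).getD []) c v)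

def update_zero (puzzle : List (List String)) (idx : Int) (path_coords : List (Int × Int)) (path_values : List String) : List (List String) :=
  (((path_coords.zip path_values).foldl
      (fun (st : List (List String) × Bool) pcv =>
        if pcv.2 == "M" then (st.1, true)
        else if st.2 == false then (pvSetCell st.1 pcv.1.1 pcv.1.2 "G", st.2)
        else (pvSetCell st.1 pcv.1.1 pcv.1.2 "V", st.2))
      (puzzle, false))).1

-- ===== PORT B =====
def update_zero_alt (puzzle : List (List String)) (idx : Int) (path_coords : List (Int × Int)) (path_values : List String) : List (List String) :=
  let pairs := path_coords.zip path_values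
  let vals := pairs.map Prod.snd
  let split := if vals.contains "M" then (PySem.List.index? vals "M").getD 0 else pairs.length
  let pz1 := (pairs.take split).foldl (fun pz pcv => pvSetCell pz pcv.1.1 pcv.1.2 "G") puzzle
  (pairs.drop split).foldl
    (fun pz pcv => if pcv.2 != "M" then pvSetCell pz pcv.1.1 pcv.1.2 "V" else pz) pz1

-- ===== PRECONDITION & SPEC =====
-- Pre_ excludes exactly the inputs on which Python A raises IndexError: a non-'M' path cell
-- whose row or column index is out of range for the (shape-invariant) puzzle.
def Pre_update_zero (puzzle : List (List String)) (idx : Int) (path_coords : List (Int × Int)) (path_values : List String) : Prop :=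
  ∀ p ∈ path_coords.zip path_values, p.2 ≠ "M" →
    PySem.Raise.InRange puzzle.length p.1.1 ∧
    PySem.Raise.InRange ((PySem.List.pyGet? puzzle p.1.1).getD []).length p.1.2
instance (puzzle : List (List String)) (idx : Int) (path_coords : List (Int × Int)) (path_values : List String) : Decidable (Pre_update_zero puzzle idx path_coords path_values) := by unfold Pre_update_zero; infer_instance

def pvWitness_update_zero : List (List String) × Int × (List (Int × Int)) × List String :=
  ([["0", "0"], ["0", "0"]], 0, [(0, 1), (1, 0), (1, 1)], ["x", "M", "y"])

def Spec_update_zero (puzzle : List (List String)) (idx : Int) (path_coords : List (Int × Int)) (path_values : List String) (out : List (List String)) : Prop := out = update_zero_alt puzzle idx path_coords path_values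
instance (puzzle : List (List String)) (idx : Int) (path_coords : List (Int × Int)) (path_values : List String) (out : List (List String)) : Decidable (Spec_update_zero puzzle idx path_coords path_values out) := by unfold Spec_update_zero; infer_instance

-- ===== CLAIM (what is proved, stated in full; the proofs are below) =====
def Claim_equal_update_zero : Prop := ∀ (puzzle : List (List String)) (idx : Int) (path_coords : List (Int × Int)) (path_values : List String), Dom_update_zero puzzle idx path_coords path_values → Pre_update_zero puzzle idx path_coords path_values → Spec_update_zero puzzle idx path_coords path_values (update_zero puzzle idx path_coords path_values)

-- ===== LEMMAS AND PROOFS =====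

-- A's step function, named for the lemmas.
def pvStepA (st : List (List String) × Bool) (pcv : (Int × Int) × String) : List (List String) × Bool :=
  if pcv.2 == "M" then (st.1, true)
  else if st.2 == false then (pvSetCell st.1 pcv.1.1 pcv.1.2 "G", st.2)
  else (pvSetCell st.1 pcv.1.1 pcv.1.2 "V", st.2)

-- B's suffix ('V') step.
def pvStepV (pz : List (List String)) (pcv : (Int × Int) × String) : List (List String) :=
  if pcv.2 != "M" then pvSetCell pz pcv.1.1 pcv.1.2 "V" else pz

-- Once the mirror flag is latched, A's fold is B's 'V' loop.
theorem foldA_true (l : List ((Int × Int) × String)) (pz : List (List String)) :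
    l.foldl pvStepA (pz, true) = (l.foldl pvStepV pz, true) := by
  induction l generalizing pz with
  | nil => rfl
  | cons h t ih =>
    simp only [List.foldl, pvStepA, pvStepV]
    by_cases hM : h.2 = "M" <;> simp [hM, ih]

-- While the flag is down, a prefix without 'M' is B's 'G' loop with the flag still down.
theorem foldA_false_noM (l : List ((Int × Int) × String)) (pz : List (List String))
    (h : "M" ∉ l.map Prod.snd) :
    l.foldl pvStepA (pz, false) =
      (l.foldl (fun pz pcv => pvSetCell pz pcv.1.1 pcv.1.2 "G") pz, false) := by
  induction l generalizing pz with
  | nil => rfl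
  | cons hd t ih =>
    simp only [List.map_cons, List.mem_cons] at h
    push_neg at h
    simp only [List.foldl, pvStepA]
    have hne : (hd.2 == "M") = false := by simp [h.1.symm]
    simp only [hne, Bool.false_eq_true, if_false, if_pos rfl]
    exact ih _ h.2

-- Core: A's fold from (pz, false) equals B's split decomposition, for any pair list.
theorem core (l : List ((Int × Int) × String)) (pz : List (List String)) :
    (l.foldl pvStepA (pz, false)).1 =
      (let vals := l.map Prod.snd
       let split := if vals.contains "M" then (PySem.List.index? vals "M").getD 0 else l.length
       (l.drop split).foldl pvStepV
         ((l.take split).foldl (fun pz pcv => pvSetCell pz pcv.1.1 pcv.1.2 "G") pz)) := by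
  by_cases hm : "M" ∈ l.map Prod.snd
  · -- split = index of first 'M'
    obtain ⟨k, hk⟩ : ∃ k, PySem.List.index? (l.map Prod.snd) "M" = some k := by
      have := (PySem.List.index?_isSome_iff (xs := l.map Prod.snd) (v := "M")).2 hm
      exact Option.isSome_iff_exists.mp this
    obtain ⟨pre, suf, hsplit, hlen, hnotpre⟩ := (PySem.List.index?_eq_some_iff _ _ _).1 hk
    simp only [List.contains_eq_mem, hm, decide_true, if_true, hk, Option.getD_some]
    -- decompose l at k
    have hkl : k < l.length := by
      have : (l.map Prod.snd).length = l.length := List.length_map ..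
      have hk2 : k < (l.map Prod.snd).length := by
        rw [hsplit]; simp [← hlen]
      omega
    have hl' : l = l.take k ++ l.drop k := (List.take_append_drop k l).symm
    -- the prefix's values are pre (no 'M'), the first dropped value is "M"
    have htakemap : (l.take k).map Prod.snd = pre := by
      have : (l.map Prod.snd).take k = pre := by rw [hsplit, ← hlen]; simp
      rwa [← List.map_take] at this
    have hpre_noM : "M" ∉ (l.take k).map Prod.snd := by rw [htakemap]; exact hnotpre
    conv_lhs => rw [hl']
    rw [List.foldl_append, foldA_false_noM _ _ hpre_noM]
    -- now handle the drop: its head has value "M"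
    cases hdrop : l.drop k with
    | nil => simp
    | cons d t =>
      have hdM : d.2 = "M" := by
        have : (l.drop k).map Prod.snd = "M" :: suf := by
          rw [List.map_drop, hsplit, ← hlen]; simp
        rw [hdrop] at this; simpa using congrArg (fun xs => xs.headD "") this
      simp only [List.foldl_cons, pvStepA, pvStepV, hdM]
      simp only [beq_self_eq_true, if_true, bne_self_eq_false, Bool.false_eq_true, if_false]
      rw [foldA_true]
  · -- no 'M': split = length, suffix empty, flag never latches
    simp only [List.contains_eq_mem, hm, decide_false, Bool.false_eq_true, if_false,
      List.take_length, List.drop_length, List.foldl_nil]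
    rw [foldA_false_noM _ _ hm]

-- ===== VERDICT (by name: the statement is the Claim_ definition above) =====
theorem update_zero_spec : Claim_equal_update_zero := by
  intro puzzle idx path_coords path_values _ _
  show update_zero puzzle idx path_coords path_values = _
  unfold update_zero update_zero_alt
  have := core (path_coords.zip path_values) puzzle
  simp only [List.length_zip] at *
  exact this
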